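-- pv_equiv track=rewrite | github.com/MrBrantCode/unitest_baseline | mut_generate/mist_train_taco/taco_6320/solution.py | validate_l_shapes
-- ===== SOURCE A (Python) =====
-- def validate_l_shapes(n, m, grid):
--     """
--     Validates if the given grid contains only valid L-shapes that do not share edges or corners.
--
--     Parameters:
--     n (int): Number of rows in the grid.
--     m (int): Number of columns in the grid.
--     grid (list of list of str): The grid containing '.' (empty cell) and '*' (shaded cell).
--
--     Returns:
--     bool: True if the grid contains only valid L-shapes, False otherwise.
--     """
--     def is_valid_l_shape(i, j):
--         """
--         Checks if the cell at (i, j) forms a valid L-shape with its neighbors.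
--         """
--         t = 0
--         for (a, b) in [(0, -1), (0, 1), (1, 0), (-1, 0)]:
--             if 0 <= i + a < n and 0 <= j + b < m and grid[i + a][j + b] == '*':
--                 t += 1
--         for (a, b) in [(1, 1), (-1, 1), (-1, -1), (1, -1)]:
--             if 0 <= i + a < n and 0 <= j + b < m and grid[i + a][j + b] == '*':
--                 t += 1
--                 if grid[i + a][j] != '*' and grid[i][j + b] != '*':
--                     return False
--         return t == 2
--
--     for i in range(n):
--         for j in range(m):
--             if grid[i][j] == '*':
--                 if not is_valid_l_shape(i, j):
--                     return False
--     return True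
-- ===== SOURCE B (Python) =====
-- _OFFS = [(0, -1), (0, 1), (1, 0), (-1, 0), (1, 1), (-1, 1), (-1, -1), (1, -1)]
--
--
-- def _ok(mask):
--     if sum(mask >> k & 1 for k in range(8)) != 2:
--         return False
--     for k in range(4, 8):
--         if mask >> k & 1:
--             a, b = _OFFS[k]
--             va = 2 if a == 1 else 3
--             vb = 0 if b == -1 else 1
--             if not (mask >> va & 1 or mask >> vb & 1):
--                 return False
--     return True
--
--
-- _VALID = frozenset(m for m in range(256) if _ok(m))
--
--
-- def validate_l_shapes(n, m, grid):
--     stars = {(i, j) for i in range(n) for j in range(m) if grid[i][j] == '*'}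
--     for (i, j) in stars:
--         mask = 0
--         for k, (a, b) in enumerate(_OFFS):
--             if (i + a, j + b) in stars:
--                 mask |= 1 << k
--         if mask not in _VALID:
--             return False
--     return True
-- ===== Notes on version B (the rewrite author's own statement) =====
-- stated objective: alternative
-- what changed: B first collects all shaded cells into a coordinate set, then checks each star's 8-neighbour bitmask against a table of the 14 valid local masks (popcount 2 + bridged diagonals) precomputed once, replacing A's per-cell pair of offset loops with counter and early returns.
-- outside the precondition, e.g. on validate_l_shapes(3, 2, [['*', '*'], ['.', '.']]): A returns False, B raises IndexError
import Mathlib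
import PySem

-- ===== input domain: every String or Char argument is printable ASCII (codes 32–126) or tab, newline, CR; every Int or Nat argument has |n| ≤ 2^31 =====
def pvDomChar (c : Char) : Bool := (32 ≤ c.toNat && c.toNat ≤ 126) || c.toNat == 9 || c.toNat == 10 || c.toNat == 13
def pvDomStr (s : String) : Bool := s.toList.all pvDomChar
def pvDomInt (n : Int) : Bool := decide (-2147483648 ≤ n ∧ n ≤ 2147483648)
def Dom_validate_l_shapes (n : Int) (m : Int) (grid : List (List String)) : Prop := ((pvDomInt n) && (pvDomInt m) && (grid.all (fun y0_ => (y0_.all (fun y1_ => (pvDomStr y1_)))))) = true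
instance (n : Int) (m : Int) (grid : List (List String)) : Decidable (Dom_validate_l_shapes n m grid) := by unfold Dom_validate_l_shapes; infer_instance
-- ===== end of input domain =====

-- B re-implements the validity test as a star-coordinate set plus a precomputed table of valid
-- 8-neighbour bitmasks; equivalence of the two per-cell rules is settled by exhaustive Bool analysis.

-- ===== PORT A =====
-- grid[x][y] == '*' (both indexes are nonnegative wherever A evaluates this; out of range gives false,
-- which inside Pre_ is never reached)
def pvCell (grid : List (List String)) (x y : Int) : Bool :=
  ((PySem.List.pyGet? grid x).bind (fun r => PySem.List.pyGet? r y)) == some "*"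

-- Python's chained comparison  lo <= x < hi
def pvIn (lo x hi : Int) : Bool := decide (lo ≤ x) && decide (x < hi)

-- second loop of is_valid_l_shape; none = the early 'return False'
def pvDiagLoop (n m : Int) (grid : List (List String)) (i j : Int) :
    List (Int × Int) → Int → Option Int
  | [], t => some t
  | ab :: rest, t =>
    if pvIn 0 (i + ab.1) n && pvIn 0 (j + ab.2) m && pvCell grid (i + ab.1) (j + ab.2) then
      if !pvCell grid (i + ab.1) j && !pvCell grid i (j + ab.2) then none
      else pvDiagLoop n m grid i j rest (t + 1)
    else pvDiagLoop n m grid i j rest t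

def pvIsValidL (n m : Int) (grid : List (List String)) (i j : Int) : Bool :=
  let t : Int := [((0:Int), (-1:Int)), (0, 1), (1, 0), (-1, 0)].foldl
    (fun t ab =>
      if pvIn 0 (i + ab.1) n && pvIn 0 (j + ab.2) m && pvCell grid (i + ab.1) (j + ab.2) then t + 1
      else t) 0
  match pvDiagLoop n m grid i j [((1:Int), (1:Int)), (-1, 1), (-1, -1), (1, -1)] t with
  | none => false
  | some t => t == 2

def pvColLoop (n m : Int) (grid : List (List String)) (i : Int) : List Int → Bool
  | [] => true
  | j :: js =>
    if pvCell grid i j then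
      if pvIsValidL n m grid i j then pvColLoop n m grid i js else false
    else pvColLoop n m grid i js

def pvRowLoop (n m : Int) (grid : List (List String)) : List Int → Bool
  | [] => true
  | i :: is =>
    if pvColLoop n m grid i (PySem.List.pyRange 0 m 1) then pvRowLoop n m grid is else false

def validate_l_shapes (n : Int) (m : Int) (grid : List (List String)) : Bool :=
  pvRowLoop n m grid (PySem.List.pyRange 0 n 1)

-- ===== PORT B =====
def pvOffs : List (Int × Int) :=
  [(0, -1), (0, 1), (1, 0), (-1, 0), (1, 1), (-1, 1), (-1, -1), (1, -1)]

-- sum(mask >> k & 1 for k in range(8))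
def pvPop (mask : Nat) : Nat := (List.range 8).foldl (fun s k => s + (mask >>> k &&& 1)) 0

-- the 'for k in range(4, 8)' loop of _ok
def pvBridge (mask : Nat) : List Nat → Bool
  | [] => true
  | k :: ks =>
    if mask >>> k &&& 1 == 1 then
      let ab := (PySem.List.pyGet? pvOffs (Int.ofNat k)).getD (0, 0)
      let va : Nat := if ab.1 == 1 then 2 else 3
      let vb : Nat := if ab.2 == -1 then 0 else 1
      if mask >>> va &&& 1 == 1 || mask >>> vb &&& 1 == 1 then pvBridge mask ks else false
    else pvBridge mask ks

def pvOkMask (mask : Nat) : Bool :=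
  if pvPop mask ≠ 2 then false else pvBridge mask [4, 5, 6, 7]

-- _VALID, computed once from the 256 possible masks
def pvValid : List Nat := (List.range 256).filter pvOkMask

-- {(i, j) for i in range(n) for j in range(m) if grid[i][j] == '*'}
def pvStars (n m : Int) (grid : List (List String)) : PySem.Set (Int × Int) :=
  PySem.Set.ofList ((PySem.List.pyRange 0 n 1).flatMap (fun i =>
    (PySem.List.pyRange 0 m 1).filterMap (fun j =>
      if pvCell grid i j then some (i, j) else none)))

def pvMaskAt (stars : List (Int × Int)) (i j : Int) : Nat :=
  (PySem.List.enumerate pvOffs).foldl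
    (fun mk kab =>
      if stars.contains (i + kab.2.1, j + kab.2.2) then mk ||| (1 <<< kab.1.toNat) else mk) 0

def pvStarLoop (stars : List (Int × Int)) : List (Int × Int) → Bool
  | [] => true
  | p :: rest =>
    if pvValid.contains (pvMaskAt stars p.1 p.2) then pvStarLoop stars rest else false

def validate_l_shapes_alt (n : Int) (m : Int) (grid : List (List String)) : Bool :=
  let stars := pvStars n m grid
  pvStarLoop stars stars

-- ===== PRECONDITION & SPEC =====
-- Pre_ excludes grids with fewer than n rows or a row (among the first n) shorter than m: on such
-- inputs A raises IndexError unless an early 'return False' happens first, and B always raises there.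
def Pre_validate_l_shapes (n : Int) (m : Int) (grid : List (List String)) : Prop :=
  n ≤ 0 ∨ m ≤ 0 ∨ (n ≤ (grid.length : Int) ∧ ∀ row ∈ grid.take n.toNat, m ≤ (row.length : Int))
instance (n : Int) (m : Int) (grid : List (List String)) : Decidable (Pre_validate_l_shapes n m grid) := by
  unfold Pre_validate_l_shapes; infer_instance

def pvWitness_validate_l_shapes : Int × Int × List (List String) :=
  (2, 2, [[".", "*"], ["*", "*"]])

def Spec_validate_l_shapes (n : Int) (m : Int) (grid : List (List String)) (out : Bool) : Prop := out = validate_l_shapes_alt n m grid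
instance (n : Int) (m : Int) (grid : List (List String)) (out : Bool) : Decidable (Spec_validate_l_shapes n m grid out) := by unfold Spec_validate_l_shapes; infer_instance

-- ===== CLAIM (what is proved, stated in full; the proofs are below) =====
def Claim_equal_validate_l_shapes : Prop := ∀ (n : Int) (m : Int) (grid : List (List String)), Dom_validate_l_shapes n m grid → Pre_validate_l_shapes n m grid → Spec_validate_l_shapes n m grid (validate_l_shapes n m grid)

-- ===== LEMMAS AND PROOFS =====

theorem pv_witness_ok :
    Dom_validate_l_shapes (pvWitness_validate_l_shapes.1) (pvWitness_validate_l_shapes.2.1) (pvWitness_validate_l_shapes.2.2) ∧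
    Pre_validate_l_shapes (pvWitness_validate_l_shapes.1) (pvWitness_validate_l_shapes.2.1) (pvWitness_validate_l_shapes.2.2) := by
  decide

theorem pvColLoop_iff (n m : Int) (grid : List (List String)) (i : Int) (l : List Int) :
    pvColLoop n m grid i l = true ↔
      ∀ j ∈ l, pvCell grid i j = true → pvIsValidL n m grid i j = true := by
  induction l with
  | nil => simp [pvColLoop]
  | cons j js ih =>
    simp only [pvColLoop, List.mem_cons]
    split_ifs with hc hv <;> simp_all

theorem pvRowLoop_iff (n m : Int) (grid : List (List String)) (l : List Int) :
    pvRowLoop n m grid l = true ↔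
      ∀ i ∈ l, ∀ j ∈ PySem.List.pyRange 0 m 1, pvCell grid i j = true → pvIsValidL n m grid i j = true := by
  induction l with
  | nil => simp [pvRowLoop]
  | cons i is ih =>
    simp only [pvRowLoop, List.mem_cons]
    split_ifs with hc <;> simp_all [pvColLoop_iff]

theorem pvStarLoop_iff (stars : List (Int × Int)) (l : List (Int × Int)) :
    pvStarLoop stars l = true ↔ ∀ p ∈ l, pvValid.contains (pvMaskAt stars p.1 p.2) = true := by
  induction l with
  | nil => simp [pvStarLoop]
  | cons p ps ih =>
    simp only [pvStarLoop, List.mem_cons]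
    split_ifs with hc <;> simp_all

theorem pvStars_contains (n m : Int) (grid : List (List String)) (x y : Int) :
    List.contains (pvStars n m grid) (x, y) = (pvIn 0 x n && pvIn 0 y m && pvCell grid x y) := by
  rw [Bool.eq_iff_iff]
  simp only [pvStars, List.contains_eq_mem, PySem.Set.mem_ofList, List.mem_flatMap,
    PySem.List.mem_pyRange_one, List.mem_filterMap, Option.ite_none_right_eq_some,
    Option.some.injEq, Prod.mk.injEq, ↓existsAndEq, and_true, Bool.decide_and, Bool.decide_eq_true,
    Bool.and_eq_true, decide_eq_true_eq, pvIn]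
  tauto

theorem mem_pvStars (n m : Int) (grid : List (List String)) (x y : Int) :
    (x, y) ∈ pvStars n m grid ↔ (0 ≤ x ∧ x < n) ∧ (0 ≤ y ∧ y < m) ∧ pvCell grid x y = true := by
  have h := pvStars_contains n m grid x y
  constructor
  · intro hm
    have hc : List.contains (pvStars n m grid) (x, y) = true := by
      simpa [List.contains_eq_mem] using hm
    rw [h] at hc
    simpa [pvIn, and_assoc] using hc
  · intro hc
    have : (pvIn 0 x n && pvIn 0 y m && pvCell grid x y) = true := by
      simp [pvIn]; tauto
    rw [← h] at this
    simpa [List.contains_eq_mem] using this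

theorem pvValid_eq : pvValid = [3, 5, 6, 9, 10, 12, 18, 20, 34, 40, 65, 72, 129, 132] := by decide

theorem pvCellKey (n m : Int) (grid : List (List String)) (i j : Int)
    (hi : 0 ≤ i ∧ i < n) (hj : 0 ≤ j ∧ j < m) :
    pvIsValidL n m grid i j = pvValid.contains (pvMaskAt (pvStars n m grid) i j) := by
  have e1 : pvIn 0 i n = true := by simp [pvIn]; omega
  have e2 : pvIn 0 j m = true := by simp [pvIn]; omega
  simp only [pvIsValidL, pvMaskAt, pvOffs, PySem.List.enumerate_cons, PySem.List.enumerate_nil,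
    List.foldl_cons, List.foldl_nil, pvDiagLoop, pvStars_contains, pvValid_eq,
    add_zero, e1, e2, Bool.true_and, Bool.and_true]
  generalize pvIn 0 (i + 1) n = r2
  generalize pvIn 0 (i + -1) n = r3
  generalize pvIn 0 (j + 1) m = s1
  generalize pvIn 0 (j + -1) m = s0
  generalize pvCell grid i (j + -1) = c0
  generalize pvCell grid i (j + 1) = c1
  generalize pvCell grid (i + 1) j = c2
  generalize pvCell grid (i + -1) j = c3
  generalize pvCell grid (i + 1) (j + 1) = d4
  generalize pvCell grid (i + -1) (j + 1) = d5
  generalize pvCell grid (i + -1) (j + -1) = d6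
  generalize pvCell grid (i + 1) (j + -1) = d7
  revert r2 r3 s1 s0 c0 c1 c2 c3 d4 d5 d6 d7
  decide

-- ===== VERDICT (by name: the statement is the Claim_ definition above) =====
theorem validate_l_shapes_spec : Claim_equal_validate_l_shapes := by
  intro n m grid _ _
  unfold Spec_validate_l_shapes validate_l_shapes validate_l_shapes_alt
  rw [Bool.eq_iff_iff, pvRowLoop_iff, pvStarLoop_iff]
  constructor
  · rintro h ⟨x, y⟩ hp
    rw [mem_pvStars] at hp
    obtain ⟨hx, hy, hc⟩ := hp
    rw [← pvCellKey n m grid x y hx hy]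
    exact h x (by rw [PySem.List.mem_pyRange_one]; omega) y
      (by rw [PySem.List.mem_pyRange_one]; omega) hc
  · intro h i hiR j hjR hc
    rw [PySem.List.mem_pyRange_one] at hiR hjR
    rw [pvCellKey n m grid i j hiR hjR]
    exact h (i, j) (by rw [mem_pvStars]; exact ⟨hiR, hjR, hc⟩)
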